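-- pv_equiv track=rewrite | github.com/benashkar/liga_acb | acb_scraper.py | is_known_american
-- ===== SOURCE A (Python) =====
-- KNOWN_AMERICAN_PLAYERS = [
--     'David Kravish', 'James Webb', 'Tyler Kalinoski', 'D.J. Stephens', 'DJ Stephens',
--     'Jahlil Okafor', 'Chris Chiozza', 'Trent Forrest', 'Grant Golden', 'Ben Lammers',
--     'Clevin Hannah', 'Spencer Butterfield', 'John Shurna', 'Thad McFadden',
--     'Troy Caupain', 'Alex Renfroe', 'Ethan Happ', 'Obi Enechionyia', 'Kevin Punter',
--     'Miles Norris', 'Myles Cale', 'Matt Thomas', 'Devon Dotson', 'Chuma Okeke',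
--     'Braxton Key', 'Darius Thompson', 'Kameron Taylor', 'Nathan Reuvers', 'Omari Moore',
--     # Additional variations
--     'Will Clyburn', 'Sergio Llull',  # Just in case
-- ]
--
-- def normalize_name(name):
--     """Normalize player name for matching."""
--     if not name:
--         return ''
--     # Remove accents and special chars, lowercase
--     import unicodedata
--     name = unicodedata.normalize('NFKD', name).encode('ASCII', 'ignore').decode('ASCII')
--     return name.lower().strip()
--
-- def is_known_american(name):
--     """Check if player name matches a known American player."""
--     name_norm = normalize_name(name)
--     for american in KNOWN_AMERICAN_PLAYERS:
--         american_norm = normalize_name(american)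
--         # Check for partial matches
--         if american_norm in name_norm or name_norm in american_norm:
--             return True
--         # Check last name match
--         american_parts = american_norm.split()
--         name_parts = name_norm.split()
--         if american_parts and name_parts:
--             if american_parts[-1] == name_parts[-1] and len(american_parts[-1]) > 3:
--                 return True
--     return False
-- ===== SOURCE B (Python) =====
-- KNOWN_AMERICAN_PLAYERS = [
--     'David Kravish', 'James Webb', 'Tyler Kalinoski', 'D.J. Stephens', 'DJ Stephens',
--     'Jahlil Okafor', 'Chris Chiozza', 'Trent Forrest', 'Grant Golden', 'Ben Lammers',
--     'Clevin Hannah', 'Spencer Butterfield', 'John Shurna', 'Thad McFadden',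
--     'Troy Caupain', 'Alex Renfroe', 'Ethan Happ', 'Obi Enechionyia', 'Kevin Punter',
--     'Miles Norris', 'Myles Cale', 'Matt Thomas', 'Devon Dotson', 'Chuma Okeke',
--     'Braxton Key', 'Darius Thompson', 'Kameron Taylor', 'Nathan Reuvers', 'Omari Moore',
--     'Will Clyburn', 'Sergio Llull',
-- ]
--
-- def _norm(name):
--     if not name:
--         return ''
--     import unicodedata
--     name = unicodedata.normalize('NFKD', name).encode('ASCII', 'ignore').decode('ASCII')
--     return name.lower().strip()
--
-- def _substrings(s):
--     return [s[i:j] for i in range(len(s) + 1) for j in range(i, len(s) + 1)]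
--
-- _NORMED = [_norm(a) for a in KNOWN_AMERICAN_PLAYERS]
-- _NAMES = set(_NORMED)
-- _SUBSTRINGS = set(sub for a in _NORMED for sub in _substrings(a))
-- _LAST = {a.split()[-1] for a in _NORMED if len(a.split()[-1]) > 3}
--
-- def is_known_american(name):
--     """Check if player name matches a known American player."""
--     n = _norm(name)
--     # n occurs inside some candidate iff n is one of the candidates' substrings
--     if n in _SUBSTRINGS:
--         return True
--     # some candidate occurs inside n iff some substring of n is a full candidate
--     if any(sub in _NAMES for sub in _substrings(n)):
--         return True
--     parts = n.split()
--     return bool(parts) and parts[-1] in _LAST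
-- ===== Notes on version B (the rewrite author's own statement) =====
-- stated objective: alternative
-- what changed: Replaces A's per-candidate containment loop by substring-set indexing: all substrings of the normalized candidates are precomputed into a hash set, so testing whether the name occurs inside a candidate becomes one set lookup, and testing whether a candidate occurs inside the name becomes enumerating the name's substrings against the set of full candidate names; the last-name check uses a precomputed set of eligible last names.
import Mathlib
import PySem

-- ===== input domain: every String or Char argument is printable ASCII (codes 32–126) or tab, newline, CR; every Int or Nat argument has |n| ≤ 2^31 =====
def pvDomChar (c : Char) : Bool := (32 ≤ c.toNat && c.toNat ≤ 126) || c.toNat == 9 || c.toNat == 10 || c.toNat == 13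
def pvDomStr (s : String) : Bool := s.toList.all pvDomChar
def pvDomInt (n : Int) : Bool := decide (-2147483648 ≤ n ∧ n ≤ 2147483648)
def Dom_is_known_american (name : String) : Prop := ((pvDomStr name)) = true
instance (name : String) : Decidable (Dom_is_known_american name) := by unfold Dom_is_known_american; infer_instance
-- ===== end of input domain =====

-- B indexes the candidates differently: it precomputes the set of ALL substrings of the
-- normalized candidates (and the set of full names and eligible last names), replacing
-- A's per-candidate containment loop by substring enumeration + set lookups.

-- ===== PORT A =====
def pvKnownA : List String := [
  "David Kravish", "James Webb", "Tyler Kalinoski", "D.J. Stephens", "DJ Stephens",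
  "Jahlil Okafor", "Chris Chiozza", "Trent Forrest", "Grant Golden", "Ben Lammers",
  "Clevin Hannah", "Spencer Butterfield", "John Shurna", "Thad McFadden",
  "Troy Caupain", "Alex Renfroe", "Ethan Happ", "Obi Enechionyia", "Kevin Punter",
  "Miles Norris", "Myles Cale", "Matt Thomas", "Devon Dotson", "Chuma Okeke",
  "Braxton Key", "Darius Thompson", "Kameron Taylor", "Nathan Reuvers", "Omari Moore",
  "Will Clyburn", "Sergio Llull"]

-- normalize_name: on the printable-ASCII domain the NFKD + encode('ASCII','ignore')
-- step is the identity, so the port is lower().strip() after the empty-string guard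
-- (exact on Dom_is_known_american).
def pvNormA (name : String) : String :=
  if name = "" then "" else PySem.Str.strip (PySem.Str.lower name)

-- the for-loop of A, one candidate at a time, with A's early returns
def pvLoopA (n : String) : List String → Bool
  | [] => false
  | a :: rest =>
    let an := pvNormA a
    if PySem.Str.isIn an n || PySem.Str.isIn n an then true
    else
      let ap := PySem.Str.split₀ an
      let np := PySem.Str.split₀ n
      if !ap.isEmpty && !np.isEmpty then
        if ap.getLast! == np.getLast! && decide (3 < PySem.Str.len ap.getLast!) then true
        else pvLoopA n rest
      else pvLoopA n rest

def is_known_american (name : String) : Bool :=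
  pvLoopA (pvNormA name) pvKnownA

-- ===== PORT B =====
def pvKnownB : List String := [
  "David Kravish", "James Webb", "Tyler Kalinoski", "D.J. Stephens", "DJ Stephens",
  "Jahlil Okafor", "Chris Chiozza", "Trent Forrest", "Grant Golden", "Ben Lammers",
  "Clevin Hannah", "Spencer Butterfield", "John Shurna", "Thad McFadden",
  "Troy Caupain", "Alex Renfroe", "Ethan Happ", "Obi Enechionyia", "Kevin Punter",
  "Miles Norris", "Myles Cale", "Matt Thomas", "Devon Dotson", "Chuma Okeke",
  "Braxton Key", "Darius Thompson", "Kameron Taylor", "Nathan Reuvers", "Omari Moore",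
  "Will Clyburn", "Sergio Llull"]

-- _norm: same ASCII-exact normalization as A's helper (see comment on pvNormA)
def pvNormB (name : String) : String :=
  if name = "" then "" else PySem.Str.strip (PySem.Str.lower name)

-- _substrings(s): [s[i:j] for i in range(len(s)+1) for j in range(i, len(s)+1)]
def pvSubstringsB (s : String) : List String :=
  (PySem.List.pyRange 0 (PySem.Str.len s + 1) 1).flatMap (fun i =>
    (PySem.List.pyRange i (PySem.Str.len s + 1) 1).map (fun j =>
      PySem.Str.slice s (some i) (some j)))

-- _NORMED: the candidates, normalized once
def pvNormedB : List String := pvKnownB.map pvNormB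

-- _NAMES = set(_NORMED)
def pvNamesB : PySem.Set String := PySem.Set.ofList pvNormedB

-- _SUBSTRINGS = set(sub for a in _NORMED for sub in _substrings(a))
def pvSubstrSetB : PySem.Set String :=
  PySem.Set.ofList (pvNormedB.flatMap pvSubstringsB)

-- _LAST: the set of candidate last names of length > 3
def pvLastNamesB : PySem.Set String :=
  PySem.Set.ofList
    ((pvNormedB.filter
        (fun a => !(PySem.Str.split₀ a).isEmpty &&
                  decide (3 < PySem.Str.len (PySem.Str.split₀ a).getLast!))).map
      (fun a => (PySem.Str.split₀ a).getLast!))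

def is_known_american_alt (name : String) : Bool :=
  let n := pvNormB name
  if pvSubstrSetB.contains n then true
  else if (pvSubstringsB n).any (fun sub => pvNamesB.contains sub) then true
  else
    let parts := PySem.Str.split₀ n
    !parts.isEmpty && pvLastNamesB.contains parts.getLast!

-- ===== PRECONDITION & SPEC =====
def Spec_is_known_american (name : String) (out : Bool) : Prop := out = is_known_american_alt name
instance (name : String) (out : Bool) : Decidable (Spec_is_known_american name out) := by unfold Spec_is_known_american; infer_instance

-- ===== CLAIM (what is proved, stated in full; the proofs are below) =====
def Claim_equal_is_known_american : Prop := ∀ (name : String), Dom_is_known_american name → Spec_is_known_american name (is_known_american name)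


-- ===== LEMMAS AND PROOFS =====

-- generic shape of one iteration of A's loop: early returns flattened to a disjunction
theorem pv_bool_step (c1 c2 c3 r : Bool) :
    (if c1 = true then true else if c2 = true then (if c3 = true then true else r) else r) =
      (c1 || c2 && c3 || r) := by
  cases c1 <;> cases c2 <;> cases c3 <;> cases r <;> rfl

theorem pv_and_shuffle (a b c d : Bool) :
    ((a && b) && (c && d)) = (b && ((a && d) && c)) := by
  cases a <;> cases b <;> cases c <;> cases d <;> rfl

theorem pv_any_or {α : Type} (L : List α) (p q : α → Bool) :
    (L.any fun x => p x || q x) = (L.any p || L.any q) := by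
  induction L with
  | nil => rfl
  | cons a rest ih =>
    simp only [List.any_cons, ih]
    cases p a <;> cases q a <;> cases rest.any p <;> cases rest.any q <;> rfl

theorem pv_any_const_and {α : Type} (L : List α) (b : Bool) (p : α → Bool) :
    (L.any fun x => b && p x) = (b && L.any p) := by
  induction L with
  | nil => cases b <;> rfl
  | cons a rest ih =>
    simp only [List.any_cons, ih]
    cases b <;> cases p a <;> rfl

-- per-candidate body of A's loop, as a single Boolean
def pvStepA (n a : String) : Bool :=
  (PySem.Str.isIn (pvNormA a) n || PySem.Str.isIn n (pvNormA a)) ||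
  (!(PySem.Str.split₀ (pvNormA a)).isEmpty && !(PySem.Str.split₀ n).isEmpty) &&
    ((PySem.Str.split₀ (pvNormA a)).getLast! == (PySem.Str.split₀ n).getLast! &&
     decide (3 < PySem.Str.len (PySem.Str.split₀ (pvNormA a)).getLast!))

theorem pv_loopA_eq_any (n : String) (L : List String) :
    pvLoopA n L = L.any (pvStepA n) := by
  induction L with
  | nil => rfl
  | cons a rest ih =>
    have h := pv_bool_step
      (PySem.Str.isIn (pvNormA a) n || PySem.Str.isIn n (pvNormA a))
      (!(PySem.Str.split₀ (pvNormA a)).isEmpty && !(PySem.Str.split₀ n).isEmpty)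
      ((PySem.Str.split₀ (pvNormA a)).getLast! == (PySem.Str.split₀ n).getLast! &&
       decide (3 < PySem.Str.len (PySem.Str.split₀ (pvNormA a)).getLast!))
      (pvLoopA n rest)
    simp only [pvLoopA]
    rw [h, ih, List.any_cons, pvStepA]

-- the substring enumeration of B is exactly Python's 'in' (infix) test
theorem pv_mem_substrings (s t : String) :
    s ∈ pvSubstringsB t ↔ s.toList <:+: t.toList := by
  rw [pvSubstringsB]
  simp only [List.mem_flatMap, List.mem_map, PySem.List.mem_pyRange_one, PySem.Str.len_eq]
  constructor
  · rintro ⟨i, ⟨hi0, _⟩, j, ⟨hij, _⟩, heq⟩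
    have h0j : 0 ≤ j := le_trans hi0 hij
    have hslice : (PySem.Str.slice t (some i) (some j)).toList
        = List.take (j.toNat - i.toNat) (List.drop i.toNat t.toList) := by
      rw [PySem.Str.toList_slice, PySem.Chars.slice_eq_listSlice,
        PySem.List.slice_toNat _ hi0 h0j]
    rw [← heq, hslice]
    exact (List.take_prefix _ _).isInfix.trans (List.drop_suffix _ _).isInfix
  · intro h
    obtain ⟨u, v, huv⟩ := h
    have hlen : u.length + s.toList.length ≤ t.toList.length := by
      rw [← huv]; simp
    refine ⟨(u.length : Int), ⟨by omega, by omega⟩,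
      ((u.length + s.toList.length : Nat) : Int), ⟨by omega, by omega⟩, ?_⟩
    refine String.toList_inj.mp ?_
    rw [PySem.Str.toList_slice, PySem.Chars.slice_eq_listSlice, PySem.List.slice_natCast,
      ← huv, List.append_assoc, List.drop_left, Nat.add_sub_cancel_left, List.take_left]

-- an 'any' of 'p a && f a == x' is membership of x in the filtered-and-mapped list
theorem pv_any_and_map (p : String → Bool) (f : String → String) (M : List String) (x : String) :
    (M.any fun a => p a && (f a == x)) = ((M.filter p).map f).contains x := by
  induction M with
  | nil => simp
  | cons a rest ih =>
    rw [List.any_cons, List.filter_cons]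
    by_cases h1 : p a
    · have hsymm : (f a == x) = (x == f a) := by
        by_cases h : f a = x
        · subst h; simp
        · simp [h, Ne.symm h]
      rw [if_pos h1, List.map_cons, List.contains_cons, ih, h1, Bool.true_and, hsymm]
    · rw [if_neg h1, ih, Bool.not_eq_true] at *
      rw [h1, Bool.false_and, Bool.false_or]

theorem pv_contains_ofList (l : List String) (x : String) :
    (PySem.Set.ofList l).contains x = l.contains x := by
  rw [Bool.eq_iff_iff]
  simp [PySem.Set.mem_ofList]

-- B's first pass: n is a member of the candidate-substrings set iff n occurs in some candidate
theorem pv_pass1 (n : String) :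
    pvSubstrSetB.contains n = pvNormedB.any (fun a => PySem.Str.isIn n a) := by
  rw [pvSubstrSetB, pv_contains_ofList, Bool.eq_iff_iff, List.contains_iff_mem,
    List.any_eq_true, List.mem_flatMap]
  constructor
  · rintro ⟨a, ha, hmem⟩
    exact ⟨a, ha, by rw [PySem.Str.isIn_iff_infix]; exact (pv_mem_substrings n a).mp hmem⟩
  · rintro ⟨a, ha, hin⟩
    exact ⟨a, ha, (pv_mem_substrings n a).mpr ((PySem.Str.isIn_iff_infix _ _).mp hin)⟩

-- B's second pass: some substring of n is a full candidate iff some candidate occurs in n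
theorem pv_pass2 (n : String) :
    ((pvSubstringsB n).any fun sub => pvNamesB.contains sub) =
      pvNormedB.any (fun a => PySem.Str.isIn a n) := by
  rw [Bool.eq_iff_iff, List.any_eq_true, List.any_eq_true]
  constructor
  · rintro ⟨sub, hsub, hc⟩
    rw [pvNamesB, pv_contains_ofList, List.contains_iff_mem] at hc
    exact ⟨sub, hc, by rw [PySem.Str.isIn_iff_infix]; exact (pv_mem_substrings sub n).mp hsub⟩
  · rintro ⟨a, ha, hin⟩
    refine ⟨a, (pv_mem_substrings a n).mpr ((PySem.Str.isIn_iff_infix _ _).mp hin), ?_⟩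
    rw [pvNamesB, pv_contains_ofList, List.contains_iff_mem]; exact ha

theorem pv_bool_step2 (c1 c2 r : Bool) :
    (if c1 = true then true else if c2 = true then true else r) = (c1 || (c2 || r)) := by
  cases c1 <;> cases c2 <;> cases r <;> rfl

-- B, with its early returns flattened to a disjunction
theorem pv_alt_eq (name : String) :
    is_known_american_alt name =
      (pvSubstrSetB.contains (pvNormB name) ||
       (((pvSubstringsB (pvNormB name)).any fun sub => pvNamesB.contains sub) ||
        (!(PySem.Str.split₀ (pvNormB name)).isEmpty &&
         pvLastNamesB.contains (PySem.Str.split₀ (pvNormB name)).getLast!))) := by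
  unfold is_known_american_alt
  simp only [pv_bool_step2]

-- ===== VERDICT (by name: the statement is the Claim_ definition above) =====
theorem is_known_american_spec : Claim_equal_is_known_american := by
  intro name _
  unfold Spec_is_known_american is_known_american
  rw [pv_alt_eq]
  have hN : pvNormB = pvNormA := rfl
  rw [hN]
  set n := pvNormA name with hn
  rw [pv_loopA_eq_any]
  -- split A's per-candidate step into the three passes
  have hstep : pvKnownA.any (pvStepA n) =
      ((pvKnownA.any fun a => PySem.Str.isIn n (pvNormA a)) ||
       ((pvKnownA.any fun a => PySem.Str.isIn (pvNormA a) n) ||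
        (!(PySem.Str.split₀ n).isEmpty &&
         pvKnownA.any (fun a =>
           (!(PySem.Str.split₀ (pvNormA a)).isEmpty &&
            decide (3 < PySem.Str.len (PySem.Str.split₀ (pvNormA a)).getLast!)) &&
           ((PySem.Str.split₀ (pvNormA a)).getLast! == (PySem.Str.split₀ n).getLast!)))) ) := by
    have h1 : pvKnownA.any (pvStepA n) =
        ((pvKnownA.any fun a => PySem.Str.isIn (pvNormA a) n || PySem.Str.isIn n (pvNormA a)) ||
         (pvKnownA.any fun a =>
           !(PySem.Str.split₀ n).isEmpty &&
           ((!(PySem.Str.split₀ (pvNormA a)).isEmpty &&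
             decide (3 < PySem.Str.len (PySem.Str.split₀ (pvNormA a)).getLast!)) &&
            ((PySem.Str.split₀ (pvNormA a)).getLast! == (PySem.Str.split₀ n).getLast!)))) := by
      rw [← pv_any_or]
      refine List.any_congr rfl (fun a => ?_)
      rw [pvStepA, pv_and_shuffle]
    rw [h1, pv_any_const_and, pv_any_or]
    cases pvKnownA.any fun a => PySem.Str.isIn (pvNormA a) n <;>
      cases pvKnownA.any fun a => PySem.Str.isIn n (pvNormA a) <;> simp
  rw [hstep]
  have hmap : ∀ (p : String → Bool), pvNormedB.any p = pvKnownA.any (fun a => p (pvNormA a)) := by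
    intro p; rw [pvNormedB, List.any_map, hN]; rfl
  rw [pv_pass1, pv_pass2, hmap, hmap]
  have hK : pvKnownB = pvKnownA := rfl
  simp only [pvLastNamesB, pvNormedB, hK, hN, List.filter_map, List.map_map, pv_contains_ofList,
    Function.comp_def]
  rw [← pv_any_and_map (fun a => !(PySem.Str.split₀ (pvNormA a)).isEmpty &&
        decide (3 < PySem.Str.len (PySem.Str.split₀ (pvNormA a)).getLast!))
      (fun a => (PySem.Str.split₀ (pvNormA a)).getLast!) pvKnownA
      ((PySem.Str.split₀ n).getLast!)]
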